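-- pv_equiv track=rewrite | github.com/edcfoshan/ArcMap-vs-ArcGISPro-Benchmark | benchmarks/multiprocess_tests_os.py | split_even_ranges
-- ===== SOURCE A (Python) =====
-- def split_even_ranges(total_items, num_workers):
--     """Split a total item count into evenly balanced ranges."""
--     total_items = int(total_items)
--     num_workers = max(1, int(num_workers))
--
--     if total_items <= 0:
--         return []
--
--     worker_count = min(num_workers, total_items)
--     base = total_items // worker_count
--     remainder = total_items % worker_count
--
--     ranges = []
--     start = 0
--     for worker_id in range(worker_count):
--         extra = 1 if worker_id < remainder else 0
--         end = start + base + extra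
--         if end > start:
--             ranges.append((start, end))
--         start = end
--
--     return ranges
-- ===== SOURCE B (Python) =====
-- def split_even_ranges(total_items, num_workers):
--     """Split a total item count into evenly balanced ranges (closed form per worker)."""
--     total_items = int(total_items)
--     num_workers = max(1, int(num_workers))
--
--     if total_items <= 0:
--         return []
--
--     worker_count = min(num_workers, total_items)
--     base, remainder = divmod(total_items, worker_count)
--
--     return [(i * base + min(i, remainder),
--              (i + 1) * base + min(i + 1, remainder))
--             for i in range(worker_count)]
-- ===== Notes on version B (the rewrite author's own statement) =====
-- stated objective: simpler
-- what changed: Replaces A's sequential loop carrying a running `start` accumulator and an `end > start` guard with a direct per-index closed form: worker i's range is (i*base + min(i, remainder), (i+1)*base + min(i+1, remainder)), built by a single comprehension.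
import Mathlib
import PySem

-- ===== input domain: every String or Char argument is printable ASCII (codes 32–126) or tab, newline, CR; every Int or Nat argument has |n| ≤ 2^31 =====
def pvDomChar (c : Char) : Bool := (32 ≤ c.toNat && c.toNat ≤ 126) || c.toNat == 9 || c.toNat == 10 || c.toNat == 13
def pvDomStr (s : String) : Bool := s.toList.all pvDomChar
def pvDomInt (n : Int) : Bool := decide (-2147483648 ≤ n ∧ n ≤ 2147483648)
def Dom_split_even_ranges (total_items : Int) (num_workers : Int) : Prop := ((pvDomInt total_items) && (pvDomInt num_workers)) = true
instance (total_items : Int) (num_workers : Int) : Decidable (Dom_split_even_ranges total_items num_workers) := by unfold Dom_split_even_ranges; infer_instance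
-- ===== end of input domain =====

-- B replaces A's sequential running-`start` accumulator (and its `end > start` guard)
-- with a closed-form expression per worker index; objective: simpler.

-- ===== PORT A =====
def split_even_ranges (total_items : Int) (num_workers : Int) : List (Int × Int) :=
  let num_workers := max 1 num_workers
  if total_items ≤ 0 then []
  else
    let worker_count := min num_workers total_items
    let base := PySem.Int.floordiv total_items worker_count
    let remainder := PySem.Int.mod total_items worker_count
    let st := (PySem.List.pyRange 0 worker_count 1).foldl
      (fun (acc : List (Int × Int) × Int) worker_id =>
        let extra : Int := if worker_id < remainder then 1 else 0
        let e := acc.2 + base + extra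
        (if e > acc.2 then acc.1 ++ [(acc.2, e)] else acc.1, e))
      ([], 0)
    st.1

-- ===== PORT B =====
def split_even_ranges_alt (total_items : Int) (num_workers : Int) : List (Int × Int) :=
  let num_workers := max 1 num_workers
  if total_items ≤ 0 then []
  else
    let worker_count := min num_workers total_items
    let base := PySem.Int.floordiv total_items worker_count
    let remainder := PySem.Int.mod total_items worker_count
    (PySem.List.pyRange 0 worker_count 1).map
      (fun i => (i * base + min i remainder, (i + 1) * base + min (i + 1) remainder))

-- ===== PRECONDITION & SPEC =====
def Spec_split_even_ranges (total_items : Int) (num_workers : Int) (out : List (Int × Int)) : Prop := out = split_even_ranges_alt total_items num_workers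
instance (total_items : Int) (num_workers : Int) (out : List (Int × Int)) : Decidable (Spec_split_even_ranges total_items num_workers out) := by unfold Spec_split_even_ranges; infer_instance

-- ===== CLAIM (what is proved, stated in full; the proofs are below) =====
def Claim_equal_split_even_ranges : Prop := ∀ (total_items : Int) (num_workers : Int), Dom_split_even_ranges total_items num_workers → Spec_split_even_ranges total_items num_workers (split_even_ranges total_items num_workers)

-- ===== LEMMAS AND PROOFS =====

-- Loop invariant: after the first n iterations of A's loop (base ≥ 1, remainder ≥ 0),
-- the accumulated list is B's closed form on range(n) and `start` is n*base + min n remainder.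
theorem pv_loop_eq (base remainder : Int) (hb : 1 ≤ base) (hr : 0 ≤ remainder) :
    ∀ n : Nat,
      (PySem.List.pyRange 0 (n : Int) 1).foldl
        (fun (acc : List (Int × Int) × Int) worker_id =>
          let extra : Int := if worker_id < remainder then 1 else 0
          let e := acc.2 + base + extra
          (if e > acc.2 then acc.1 ++ [(acc.2, e)] else acc.1, e))
        ([], 0)
      = ((PySem.List.pyRange 0 (n : Int) 1).map
          (fun i => (i * base + min i remainder, (i + 1) * base + min (i + 1) remainder)),
         (n : Int) * base + min (n : Int) remainder) := by
  intro n
  induction n with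
  | zero => simp [PySem.List.pyRange_one_eq_nil, min_eq_left hr]
  | succ n ih =>
    have hcast : ((n + 1 : Nat) : Int) = (n : Int) + 1 := by push_cast; ring
    rw [hcast, PySem.List.pyRange_one_succ_right (by positivity), List.foldl_append,
      List.map_append, ih]
    simp only [List.foldl_cons, List.foldl_nil, List.map_cons, List.map_nil]
    have hmul : ((n : Int) + 1) * base = (n : Int) * base + base := by ring
    have hgt : ((n : Int) * base + min (n : Int) remainder + base
        + if (n : Int) < remainder then 1 else 0) > (n : Int) * base + min (n : Int) remainder := by
      split_ifs <;> omega
    rw [Prod.mk.injEq, if_pos hgt, hmul]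
    constructor
    · simp only [List.append_cancel_left_eq, List.cons.injEq, Prod.mk.injEq, true_and, and_true]
      split_ifs <;> omega
    · split_ifs <;> omega

-- ===== VERDICT (by name: the statement is the Claim_ definition above) =====
theorem split_even_ranges_spec : Claim_equal_split_even_ranges := by
  intro total_items num_workers _
  unfold Spec_split_even_ranges split_even_ranges split_even_ranges_alt
  by_cases ht : total_items ≤ 0
  · simp [ht]
  · simp only [ht, if_false]
    push Not at ht
    set wc := min (max 1 num_workers) total_items with hwc
    have hwc1 : 1 ≤ wc := by
      simp only [hwc, le_min_iff]
      exact ⟨le_max_left _ _, ht⟩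
    have hwct : wc ≤ total_items := min_le_right _ _
    have hwcpos : (0 : Int) < wc := by omega
    have hfd : PySem.Int.floordiv total_items wc = total_items / wc :=
      PySem.Int.floordiv_eq_ediv_of_pos hwcpos
    have hmd : PySem.Int.mod total_items wc = total_items % wc :=
      PySem.Int.mod_eq_emod_of_pos hwcpos
    have hb : 1 ≤ PySem.Int.floordiv total_items wc := by
      rw [hfd, Int.le_ediv_iff_mul_le hwcpos, one_mul]; exact hwct
    have hr : 0 ≤ PySem.Int.mod total_items wc := by
      rw [hmd]; exact Int.emod_nonneg _ (by omega)
    have hn : ((wc.toNat : Nat) : Int) = wc := Int.toNat_of_nonneg (by omega)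
    have := pv_loop_eq (PySem.Int.floordiv total_items wc)
      (PySem.Int.mod total_items wc) hb hr wc.toNat
    rw [hn] at this
    rw [this]
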